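-- pv_equiv track=rewrite | github.com/tiandiyijian/myLeetcode | m17.13.py | respace1
-- ===== SOURCE A (Python) =====
-- from typing import List
-- from functools import lru_cache
--
-- def respace1(dictionary: List[str], sentence: str) -> int:
--     len_sentence = len(sentence)
--     dictionary = set(dictionary)
--     @lru_cache(maxsize=1000)
--     def helper(start):
--         s = start
--         if start == len_sentence:
--             return 0
--         ans = len_sentence - start
--         for i in range(start + 1, len_sentence + 1):
--             if sentence[start: i] in dictionary:
--                 ans = min(helper(i), ans)
--         if sentence[s] not in dictionary:
--             return min(ans, 1 + helper(start+1))
--         return ans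
--     return helper(0)
-- ===== SOURCE B (Python) =====
-- def respace1(dictionary, sentence):
--     # Bottom-up DP over suffixes: dp[j] = min unrecognized chars in sentence[j:].
--     # Instead of enumerating every substring, try each distinct dictionary word
--     # at each position (order of iteration is irrelevant: we only take a min).
--     n = len(sentence)
--     words = set(dictionary)
--     dp = [0] * (n + 1)
--     for j in range(n - 1, -1, -1):
--         best = dp[j + 1] + 1
--         for w in words:
--             if w and sentence.startswith(w, j):
--                 best = min(best, dp[j + len(w)])
--         dp[j] = best
--     return dp[0]
-- ===== Notes on version B (the rewrite author's own statement) =====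
-- stated objective: faster
-- what changed: A's memoized top-down recursion that enumerates and hashes every substring sentence[start:i] is replaced by an iterative bottom-up DP over suffixes that tries each distinct dictionary word at each position with a prefix check, so no substrings are materialized or hashed.
import Mathlib
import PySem

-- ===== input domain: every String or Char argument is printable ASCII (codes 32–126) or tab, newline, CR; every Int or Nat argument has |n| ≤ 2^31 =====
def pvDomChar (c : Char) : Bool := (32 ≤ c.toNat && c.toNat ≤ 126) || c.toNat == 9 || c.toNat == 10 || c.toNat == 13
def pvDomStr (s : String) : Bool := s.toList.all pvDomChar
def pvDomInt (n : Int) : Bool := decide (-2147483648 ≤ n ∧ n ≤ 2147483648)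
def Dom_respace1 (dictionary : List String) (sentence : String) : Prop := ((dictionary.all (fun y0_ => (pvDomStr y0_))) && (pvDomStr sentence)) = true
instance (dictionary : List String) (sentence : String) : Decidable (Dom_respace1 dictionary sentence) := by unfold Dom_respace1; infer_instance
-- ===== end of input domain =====

-- B replaces A's memoized recursion over ALL substrings with a bottom-up DP over suffixes
-- that tries each dictionary word at each position (objective: faster — fewer/cheaper probes).


-- ===== PORT A =====
-- Strings are handled on the List Char side throughout (the PySem convention).
-- helper(start) of A, with a fuel argument only for totality: A's recursion always calls
-- helper(i) with start < i ≤ n, so any fuel ≥ n - start reproduces Python exactly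
-- (respace1 below passes fuel = n). No behaviour is changed by the fuel.
def helperA (S : PySem.Set (List Char)) (cs : List Char) (n : Nat) : Nat → Nat → Int
  | 0, _ => 0
  | fuel + 1, start =>
    if start = n then 0
    else
      -- ans = len_sentence - start; for i in range(start+1, len_sentence+1):
      --   if sentence[start:i] in dictionary: ans = min(helper(i), ans)
      let ans : Int :=
        (PySem.List.pyRange ((start : Int) + 1) ((n : Int) + 1) 1).foldl
          (fun ans i =>
            if PySem.Set.contains S (PySem.List.slice cs (some (start : Int)) (some i)) then
              min (helperA S cs n fuel i.toNat) ans
            else ans)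
          ((n : Int) - (start : Int))
      -- if sentence[s] not in dictionary: return min(ans, 1 + helper(start+1))
      -- (pyGet? is `some` here since start < n; Option.toList turns it into the 1-char string)
      if ¬ (PySem.Set.contains S (PySem.List.pyGet? cs (start : Int)).toList = true) then
        min ans (1 + helperA S cs n fuel (start + 1))
      else ans

def respace1 (dictionary : List String) (sentence : String) : Int :=
  let cs := sentence.toList
  let n := cs.length
  let S := PySem.Set.ofList (dictionary.map String.toList)   -- dictionary = set(dictionary)
  helperA S cs n n 0

-- ===== PORT B =====
-- Source B: dp[j] = min unrecognized chars in sentence[j:]; filled backwards, trying each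
-- distinct dictionary word at each position. dpB ws cs k builds the list [dp (n-k), …, dp n]
-- (the backward for-loop over j = n-1 … 0 becomes recursion on k = n - j); respace1_alt
-- passes ws = set(dictionary). Iterating Python's set is only used for a min of Ints,
-- which is order-independent, so folding the PySem.Set list is exact.
-- `sentence.startswith(w, j)` is ported as: w starts (cs.drop j).
def dpB (ws : List (List Char)) (cs : List Char) : Nat → List Int
  | 0 => [0]
  | k + 1 =>
    let rest := dpB ws cs k
    let j := cs.length - (k + 1)
    let best : Int :=
      ws.foldl
        (fun best w =>
          if !w.isEmpty && PySem.Chars.startswith (cs.drop j) w then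
            min best (rest.getD (w.length - 1) 0)
          else best)
        (rest.headD 0 + 1)
    best :: rest

def respace1_alt (dictionary : List String) (sentence : String) : Int :=
  let cs := sentence.toList
  let words := PySem.Set.ofList (dictionary.map String.toList)   -- words = set(dictionary)
  (dpB words cs cs.length).headD 0

-- ===== PRECONDITION & SPEC =====
def Spec_respace1 (dictionary : List String) (sentence : String) (out : Int) : Prop := out = respace1_alt dictionary sentence
instance (dictionary : List String) (sentence : String) (out : Int) : Decidable (Spec_respace1 dictionary sentence out) := by unfold Spec_respace1; infer_instance

-- ===== CLAIM (what is proved, stated in full; the proofs are below) =====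
def Claim_equal_respace1 : Prop := ∀ (dictionary : List String) (sentence : String), Dom_respace1 dictionary sentence → Spec_respace1 dictionary sentence (respace1 dictionary sentence)

-- ===== LEMMAS AND PROOFS =====

-- A "conditional running minimum" fold, the shape of the inner loop of both programs.
def foldMin {α : Type} (P : α → Bool) (f : α → Int) (a0 : Int) (l : List α) : Int :=
  l.foldl (fun a x => if P x then min a (f x) else a) a0

theorem foldMin_le_init {α : Type} (P : α → Bool) (f : α → Int) :
    ∀ (l : List α) (a0 : Int), foldMin P f a0 l ≤ a0 := by
  intro l
  induction l with
  | nil => intro a0; simp [foldMin]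
  | cons x xs ih =>
    intro a0
    simp only [foldMin, List.foldl_cons]
    by_cases h : P x = true
    · simp only [h, if_true]
      exact le_trans (ih (min a0 (f x))) (min_le_left _ _)
    · simp only [h]
      exact ih a0

theorem foldMin_le_mem {α : Type} (P : α → Bool) (f : α → Int) :
    ∀ (l : List α) (a0 : Int) (x : α), x ∈ l → P x = true → foldMin P f a0 l ≤ f x := by
  intro l
  induction l with
  | nil => intro _ x hx; simp at hx
  | cons y ys ih =>
    intro a0 x hx hP
    simp only [foldMin, List.foldl_cons]
    rcases List.mem_cons.mp hx with rfl | hx'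
    · simp only [hP, if_true]
      exact le_trans (foldMin_le_init P f ys _) (min_le_right _ _)
    · by_cases h : P y = true <;> simp only [h, if_true] <;> exact ih _ x hx' hP

theorem foldMin_eq_or {α : Type} (P : α → Bool) (f : α → Int) :
    ∀ (l : List α) (a0 : Int),
    foldMin P f a0 l = a0 ∨ ∃ x, x ∈ l ∧ P x = true ∧ foldMin P f a0 l = f x := by
  intro l
  induction l with
  | nil => intro a0; left; rfl
  | cons y ys ih =>
    intro a0
    by_cases h : P y = true
    · have hstep : foldMin P f a0 (y :: ys) = foldMin P f (min a0 (f y)) ys := by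
        simp only [foldMin, List.foldl_cons]
        rw [if_pos h]
      rcases ih (min a0 (f y)) with heq | ⟨x, hx, hP, heq⟩
      · rcases le_total a0 (f y) with hle | hle
        · left; rw [hstep, heq, min_eq_left hle]
        · right; exact ⟨y, List.mem_cons_self, h, by rw [hstep, heq, min_eq_right hle]⟩
      · right; exact ⟨x, List.mem_cons_of_mem _ hx, hP, by rw [hstep, heq]⟩
    · have hstep : foldMin P f a0 (y :: ys) = foldMin P f a0 ys := by
        simp only [foldMin, List.foldl_cons]
        rw [if_neg h]
      rcases ih a0 with heq | ⟨x, hx, hP, heq⟩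
      · left; rw [hstep, heq]
      · right; exact ⟨x, List.mem_cons_of_mem _ hx, hP, by rw [hstep, heq]⟩

theorem le_foldMin {α : Type} (P : α → Bool) (f : α → Int) (l : List α) (a0 c : Int)
    (h0 : c ≤ a0) (hm : ∀ x, x ∈ l → P x = true → c ≤ f x) : c ≤ foldMin P f a0 l := by
  rcases foldMin_eq_or P f l a0 with heq | ⟨x, hx, hP, heq⟩
  · rw [heq]; exact h0
  · rw [heq]; exact hm x hx hP

-- Indexing into dpB reads dp values of later positions.
theorem dpB_getD (ws : List (List Char)) (cs : List Char) :
    ∀ (m k : Nat), m ≤ k → (dpB ws cs k).getD m 0 = (dpB ws cs (k - m)).headD 0 := by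
  intro m
  induction m with
  | zero =>
    intro k _
    cases h : dpB ws cs k with
    | nil => simp
    | cons a l => simp
  | succ m ih =>
    intro k hm
    cases k with
    | zero => omega
    | succ k' =>
      show (dpB ws cs (k' + 1)).getD (m + 1) 0 = _
      rw [dpB]
      simp only [List.getD_cons_succ]
      rw [ih k' (by omega), Nat.succ_sub_succ]

theorem dp_le (ws : List (List Char)) (cs : List Char) :
    ∀ (k : Nat), (dpB ws cs k).headD 0 ≤ (k : Int) := by
  intro k
  induction k with
  | zero => simp [dpB]
  | succ k' ih =>
    rw [dpB]
    simp only [List.headD_cons]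
    have h1 := foldMin_le_init
      (fun w => !w.isEmpty && PySem.Chars.startswith (cs.drop (cs.length - (k' + 1))) w)
      (fun w => (dpB ws cs k').getD (w.length - 1) 0) ws ((dpB ws cs k').headD 0 + 1)
    rw [foldMin] at h1
    push_cast
    omega

-- Membership transfer: the set A builds holds exactly the words.
theorem contains_ofList_iff (ws : List (List Char)) (x : List Char) :
    PySem.Set.contains (PySem.Set.ofList ws) x = true ↔ x ∈ ws := by
  simp [PySem.Set.contains, PySem.Set.mem_ofList]

-- A slice sentence[start:i] with natural bounds.
theorem slice_eq_take (cs : List Char) (start : Nat) (i : Int) (h0 : 0 ≤ i) :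
    PySem.List.slice cs (some (start : Int)) (some i) = (cs.drop start).take (i.toNat - start) := by
  rw [PySem.List.slice_toNat _ (Int.natCast_nonneg start) h0]
  simp

theorem isEmpty_false_len (w : List Char) (h : w.isEmpty = false) : 1 ≤ w.length := by
  cases w with
  | nil => simp at h
  | cons _ _ => simp

-- The key simultaneous induction: A's helper at position n - k equals B's dp value there,
-- for any fuel ≥ k.
set_option maxHeartbeats 1000000 in
theorem helperA_eq_dpB (ws : List (List Char)) (cs : List Char) :
    ∀ (k : Nat), k ≤ cs.length → ∀ (fuel : Nat), k ≤ fuel →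
      helperA (PySem.Set.ofList ws) cs cs.length fuel (cs.length - k)
        = (dpB ws cs k).headD 0 := by
  intro k
  induction k using Nat.strong_induction_on with
  | _ k IH =>
  intro hk fuel hfuel
  cases k with
  | zero =>
    cases fuel with
    | zero => simp [helperA, dpB]
    | succ f => simp [helperA, dpB]
  | succ K =>
    obtain ⟨F, rfl⟩ : ∃ F, fuel = F + 1 := ⟨fuel - 1, by omega⟩
    have hKF : K ≤ F := by omega
    have hstart_lt : cs.length - (K + 1) < cs.length := by omega
    -- instances of the induction hypothesis
    have IHi : ∀ i : Int, ((cs.length - (K + 1) : Nat) : Int) + 1 ≤ i → i < (cs.length : Int) + 1 →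
        helperA (PySem.Set.ofList ws) cs cs.length F i.toNat
          = (dpB ws cs (cs.length - i.toNat)).headD 0 := by
      intro i h1 h2
      have h3 : cs.length - (K + 1) + 1 ≤ i.toNat := by omega
      have h4 : i.toNat ≤ cs.length := by omega
      have hlt : cs.length - i.toNat < K + 1 := by omega
      have := IH (cs.length - i.toNat) hlt (by omega) F (by omega)
      rwa [show cs.length - (cs.length - i.toNat) = i.toNat from by omega] at this
    have IH1 : helperA (PySem.Set.ofList ws) cs cs.length F (cs.length - (K + 1) + 1)
        = (dpB ws cs K).headD 0 := by
      have := IH K (by omega) (by omega) F hKF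
      rwa [show cs.length - K = cs.length - (K + 1) + 1 from by omega] at this
    -- unfold one step of A
    rw [helperA]
    rw [if_neg (show ¬ cs.length - (K + 1) = cs.length from by omega)]
    -- A's loop in canonical form, with helper values replaced by dp values (IH)
    have hfoldA :
        (PySem.List.pyRange (((cs.length - (K + 1) : Nat) : Int) + 1) ((cs.length : Int) + 1) 1).foldl
          (fun ans i =>
            if PySem.Set.contains (PySem.Set.ofList ws)
                (PySem.List.slice cs (some ((cs.length - (K + 1) : Nat) : Int)) (some i)) then
              min (helperA (PySem.Set.ofList ws) cs cs.length F i.toNat) ans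
            else ans)
          ((cs.length : Int) - ((cs.length - (K + 1) : Nat) : Int))
        = foldMin
            (fun i => PySem.Set.contains (PySem.Set.ofList ws)
              (PySem.List.slice cs (some ((cs.length - (K + 1) : Nat) : Int)) (some i)))
            (fun i => (dpB ws cs (cs.length - i.toNat)).headD 0)
            ((cs.length : Int) - ((cs.length - (K + 1) : Nat) : Int))
            (PySem.List.pyRange (((cs.length - (K + 1) : Nat) : Int) + 1) ((cs.length : Int) + 1) 1) := by
      rw [foldMin]
      apply PySem.List.foldl_congr_mem
      intro a i hi
      obtain ⟨h1, h2⟩ := PySem.List.mem_pyRange_one.mp hi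
      rw [IHi i h1 h2, min_comm]
    -- B's value in canonical form, with getD replaced by dp values
    have hfoldB : (dpB ws cs (K + 1)).headD 0
        = foldMin
            (fun w => !w.isEmpty && PySem.Chars.startswith (cs.drop (cs.length - (K + 1))) w)
            (fun w => (dpB ws cs (K + 1 - w.length)).headD 0)
            ((dpB ws cs K).headD 0 + 1) ws := by
      rw [dpB]
      simp only [List.headD_cons]
      rw [foldMin]
      apply PySem.List.foldl_congr_mem
      intro a w hw
      by_cases hp : (!w.isEmpty && PySem.Chars.startswith (cs.drop (cs.length - (K + 1))) w) = true
      · obtain ⟨hw1, hw2⟩ := Bool.and_eq_true_iff.mp hp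
        have hpref : w <+: cs.drop (cs.length - (K + 1)) :=
          (PySem.Chars.startswith_iff _ _).mp hw2
        have hwle : w.length ≤ K + 1 := by
          have := hpref.length_le
          simp only [List.length_drop] at this
          omega
        have hwpos : 1 ≤ w.length := isEmpty_false_len w (Bool.not_eq_true' .. ▸ hw1)
        have hval : (dpB ws cs K).getD (w.length - 1) 0 = (dpB ws cs (K + 1 - w.length)).headD 0 := by
          rw [dpB_getD ws cs (w.length - 1) K (by omega)]
          rw [show K - (w.length - 1) = K + 1 - w.length from by omega]
        rw [hval]
      · rw [if_neg hp, if_neg hp]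
    -- candidate correspondence, A-matches → B-matches
    have corrAB : ∀ i : Int,
        i ∈ PySem.List.pyRange (((cs.length - (K + 1) : Nat) : Int) + 1) ((cs.length : Int) + 1) 1 →
        PySem.Set.contains (PySem.Set.ofList ws)
          (PySem.List.slice cs (some ((cs.length - (K + 1) : Nat) : Int)) (some i)) = true →
        ∃ w, w ∈ ws ∧ (!w.isEmpty && PySem.Chars.startswith (cs.drop (cs.length - (K + 1))) w) = true ∧
          (dpB ws cs (K + 1 - w.length)).headD 0 = (dpB ws cs (cs.length - i.toNat)).headD 0 := by
      intro i hi hp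
      obtain ⟨h1, h2⟩ := PySem.List.mem_pyRange_one.mp hi
      have hwt : PySem.List.slice cs (some ((cs.length - (K + 1) : Nat) : Int)) (some i)
          = (cs.drop (cs.length - (K + 1))).take (i.toNat - (cs.length - (K + 1))) :=
        slice_eq_take cs (cs.length - (K + 1)) i (by omega)
      refine ⟨_, (contains_ofList_iff ws _).mp hp, ?_, ?_⟩
      · rw [hwt]
        have hlen : ((cs.drop (cs.length - (K + 1))).take (i.toNat - (cs.length - (K + 1)))).length
            = i.toNat - (cs.length - (K + 1)) := by
          simp only [List.length_take, List.length_drop]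
          omega
        apply Bool.and_eq_true_iff.mpr
        constructor
        · rw [Bool.not_eq_true']
          cases hE : ((cs.drop (cs.length - (K + 1))).take (i.toNat - (cs.length - (K + 1)))).isEmpty with
          | false => rfl
          | true =>
            exfalso
            rw [List.isEmpty_iff] at hE
            rw [hE] at hlen
            simp at hlen
            omega
        · exact (PySem.Chars.startswith_iff _ _).mpr (List.take_prefix _ _)
      · rw [hwt]
        have hlen : ((cs.drop (cs.length - (K + 1))).take (i.toNat - (cs.length - (K + 1)))).length
            = i.toNat - (cs.length - (K + 1)) := by
          simp only [List.length_take, List.length_drop]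
          omega
        rw [hlen, show K + 1 - (i.toNat - (cs.length - (K + 1))) = cs.length - i.toNat from by omega]
    -- candidate correspondence, B-matches → A-matches
    have corrBA : ∀ w, w ∈ ws →
        (!w.isEmpty && PySem.Chars.startswith (cs.drop (cs.length - (K + 1))) w) = true →
        ∃ i : Int,
          i ∈ PySem.List.pyRange (((cs.length - (K + 1) : Nat) : Int) + 1) ((cs.length : Int) + 1) 1 ∧
          PySem.Set.contains (PySem.Set.ofList ws)
            (PySem.List.slice cs (some ((cs.length - (K + 1) : Nat) : Int)) (some i)) = true ∧
          (dpB ws cs (cs.length - i.toNat)).headD 0 = (dpB ws cs (K + 1 - w.length)).headD 0 := by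
      intro w hw hp
      obtain ⟨hw1, hw2⟩ := Bool.and_eq_true_iff.mp hp
      have hpref : w <+: cs.drop (cs.length - (K + 1)) :=
        (PySem.Chars.startswith_iff _ _).mp hw2
      have hwle : w.length ≤ K + 1 := by
        have := hpref.length_le
        simp only [List.length_drop] at this
        omega
      have hwpos : 1 ≤ w.length := isEmpty_false_len w (Bool.not_eq_true' .. ▸ hw1)
      refine ⟨((cs.length - (K + 1) : Nat) : Int) + w.length, ?_, ?_, ?_⟩
      · apply PySem.List.mem_pyRange_one.mpr
        constructor <;> omega
      · have hsl : PySem.List.slice cs (some ((cs.length - (K + 1) : Nat) : Int))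
            (some (((cs.length - (K + 1) : Nat) : Int) + w.length)) = w := by
          rw [slice_eq_take cs (cs.length - (K + 1)) _ (by positivity)]
          rw [show ((((cs.length - (K + 1) : Nat) : Int)) + (w.length : Int)).toNat
              - (cs.length - (K + 1)) = w.length from by omega]
          exact (List.prefix_iff_eq_take.mp hpref).symm
        rw [hsl]
        exact (contains_ofList_iff ws w).mpr hw
      · rw [show cs.length - ((((cs.length - (K + 1) : Nat) : Int)) + (w.length : Int)).toNat
            = K + 1 - w.length from by omega]
    -- initial values and bounds
    have hinit : (cs.length : Int) - ((cs.length - (K + 1) : Nat) : Int) = (K : Int) + 1 := by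
      omega
    have hdpK_le : (dpB ws cs K).headD 0 ≤ (K : Int) := dp_le ws cs K
    rw [hfoldA, hfoldB]
    -- names for the two canonical folds
    have hVB_le_FA :
        foldMin (fun w => !w.isEmpty && PySem.Chars.startswith (cs.drop (cs.length - (K + 1))) w)
          (fun w => (dpB ws cs (K + 1 - w.length)).headD 0) ((dpB ws cs K).headD 0 + 1) ws
        ≤ foldMin (fun i => PySem.Set.contains (PySem.Set.ofList ws)
            (PySem.List.slice cs (some ((cs.length - (K + 1) : Nat) : Int)) (some i)))
          (fun i => (dpB ws cs (cs.length - i.toNat)).headD 0)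
          ((cs.length : Int) - ((cs.length - (K + 1) : Nat) : Int))
          (PySem.List.pyRange (((cs.length - (K + 1) : Nat) : Int) + 1) ((cs.length : Int) + 1) 1) := by
      apply le_foldMin
      · rw [hinit]
        have := foldMin_le_init
          (fun w => !w.isEmpty && PySem.Chars.startswith (cs.drop (cs.length - (K + 1))) w)
          (fun w => (dpB ws cs (K + 1 - w.length)).headD 0) ws ((dpB ws cs K).headD 0 + 1)
        omega
      · intro i hi hp
        obtain ⟨w, hw, hq, hgw⟩ := corrAB i hi hp
        calc _ ≤ (dpB ws cs (K + 1 - w.length)).headD 0 := foldMin_le_mem _ _ ws _ w hw hq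
          _ = _ := hgw
    have hFA_le_matches : ∀ w, w ∈ ws →
        (!w.isEmpty && PySem.Chars.startswith (cs.drop (cs.length - (K + 1))) w) = true →
        foldMin (fun i => PySem.Set.contains (PySem.Set.ofList ws)
            (PySem.List.slice cs (some ((cs.length - (K + 1) : Nat) : Int)) (some i)))
          (fun i => (dpB ws cs (cs.length - i.toNat)).headD 0)
          ((cs.length : Int) - ((cs.length - (K + 1) : Nat) : Int))
          (PySem.List.pyRange (((cs.length - (K + 1) : Nat) : Int) + 1) ((cs.length : Int) + 1) 1)
        ≤ (dpB ws cs (K + 1 - w.length)).headD 0 := by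
      intro w hw hp
      obtain ⟨i, hi, hpA, hgi⟩ := corrBA w hw hp
      calc _ ≤ (dpB ws cs (cs.length - i.toNat)).headD 0 := foldMin_le_mem _ _ _ _ i hi hpA
        _ = _ := hgi
    -- the character at start
    have hget : PySem.List.pyGet? cs ((cs.length - (K + 1) : Nat) : Int)
        = some (cs[cs.length - (K + 1)]'hstart_lt) := by
      rw [PySem.List.pyGet?_natCast]
      exact List.getElem?_eq_getElem hstart_lt
    have hchar_slice : PySem.List.slice cs (some ((cs.length - (K + 1) : Nat) : Int))
        (some (((cs.length - (K + 1) : Nat) : Int) + 1)) = [cs[cs.length - (K + 1)]'hstart_lt] := by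
      rw [slice_eq_take cs (cs.length - (K + 1)) _ (by positivity)]
      rw [show ((((cs.length - (K + 1) : Nat) : Int)) + 1).toNat - (cs.length - (K + 1)) = 1 from by omega]
      rw [List.drop_eq_getElem_cons hstart_lt]
      rfl
    rw [hget]
    simp only [Option.toList_some]
    by_cases hc : PySem.Set.contains (PySem.Set.ofList ws) [cs[cs.length - (K + 1)]'hstart_lt] = true
    · -- the single character is a word: A returns its loop minimum unchanged;
      -- i = start+1 is then an A-match whose value is dp K.
      rw [if_neg (not_not_intro hc)]
      have hmem : (((cs.length - (K + 1) : Nat) : Int)) + 1 ∈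
          PySem.List.pyRange (((cs.length - (K + 1) : Nat) : Int) + 1) ((cs.length : Int) + 1) 1 := by
        apply PySem.List.mem_pyRange_one.mpr
        constructor
        · omega
        · omega
      have hmatch : PySem.Set.contains (PySem.Set.ofList ws)
          (PySem.List.slice cs (some ((cs.length - (K + 1) : Nat) : Int))
            (some (((cs.length - (K + 1) : Nat) : Int) + 1))) = true := by
        rw [hchar_slice]; exact hc
      have hFA_le_dpK :
          foldMin (fun i => PySem.Set.contains (PySem.Set.ofList ws)
              (PySem.List.slice cs (some ((cs.length - (K + 1) : Nat) : Int)) (some i)))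
            (fun i => (dpB ws cs (cs.length - i.toNat)).headD 0)
            ((cs.length : Int) - ((cs.length - (K + 1) : Nat) : Int))
            (PySem.List.pyRange (((cs.length - (K + 1) : Nat) : Int) + 1) ((cs.length : Int) + 1) 1)
          ≤ (dpB ws cs K).headD 0 := by
        calc _ ≤ (dpB ws cs (cs.length - ((((cs.length - (K + 1) : Nat) : Int)) + 1).toNat)).headD 0 :=
              foldMin_le_mem
                (fun i => PySem.Set.contains (PySem.Set.ofList ws)
                  (PySem.List.slice cs (some ((cs.length - (K + 1) : Nat) : Int)) (some i)))
                (fun i => (dpB ws cs (cs.length - i.toNat)).headD 0)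
                (PySem.List.pyRange (((cs.length - (K + 1) : Nat) : Int) + 1) ((cs.length : Int) + 1) 1)
                ((cs.length : Int) - ((cs.length - (K + 1) : Nat) : Int)) _ hmem hmatch
          _ = (dpB ws cs K).headD 0 := by
              rw [show cs.length - ((((cs.length - (K + 1) : Nat) : Int)) + 1).toNat = K from by omega]
      apply le_antisymm
      · apply le_foldMin
        · omega
        · exact hFA_le_matches
      · exact hVB_le_FA
    · -- the single character is not a word: A additionally tries 1 + helper(start+1).
      rw [if_pos hc]
      rw [IH1]
      apply le_antisymm
      · apply le_foldMin
        · calc min _ (1 + (dpB ws cs K).headD 0) ≤ 1 + (dpB ws cs K).headD 0 := min_le_right _ _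
            _ = (dpB ws cs K).headD 0 + 1 := by ring
        · intro w hw hp
          exact le_trans (min_le_left _ _) (hFA_le_matches w hw hp)
      · apply le_min hVB_le_FA
        have := foldMin_le_init
          (fun w => !w.isEmpty && PySem.Chars.startswith (cs.drop (cs.length - (K + 1))) w)
          (fun w => (dpB ws cs (K + 1 - w.length)).headD 0) ws ((dpB ws cs K).headD 0 + 1)
        omega

-- ===== VERDICT (by name: the statement is the Claim_ definition above) =====
theorem respace1_spec : Claim_equal_respace1 := by
  intro dictionary sentence _
  unfold Spec_respace1 respace1 respace1_alt
  have := helperA_eq_dpB (PySem.Set.ofList (dictionary.map String.toList)) sentence.toList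
    sentence.toList.length le_rfl sentence.toList.length le_rfl
  rw [Nat.sub_self, PySem.Set.ofList_ofList] at this
  exact this
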